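-- pv_equiv track=rewrite | github.com/kh0ttab/amazon-ppc-intelligence | backend/competitor/scraper.py | compare_keywords
-- ===== SOURCE A (Python) =====
-- def compare_keywords(competitor_kws: list[str], your_kws: list[str]) -> dict:
--     comp = set(k.lower() for k in competitor_kws)
--     yours = set(k.lower() for k in your_kws)
--     return {
--         "gap": sorted(comp - yours),
--         "shared": sorted(comp & yours),
--         "unique": sorted(yours - comp),
--     }
-- ===== SOURCE B (Python) =====
-- def compare_keywords(competitor_kws: list[str], your_kws: list[str]) -> dict:
--     # Sort the deduplicated lowercased keywords once, then classify with a
--     # single two-pointer merge over the two sorted lists; each bucket comes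
--     # out already sorted, so no per-bucket set algebra or final sort is needed.
--     cs = sorted({k.lower() for k in competitor_kws})
--     ys = sorted({k.lower() for k in your_kws})
--     gap, shared, unique = [], [], []
--     i = j = 0
--     while i < len(cs) and j < len(ys):
--         if cs[i] == ys[j]:
--             shared.append(cs[i]); i += 1; j += 1
--         elif cs[i] < ys[j]:
--             gap.append(cs[i]); i += 1
--         else:
--             unique.append(ys[j]); j += 1
--     gap += cs[i:]
--     unique += ys[j:]
--     return {"gap": gap, "shared": shared, "unique": unique}
-- ===== Notes on version B (the rewrite author's own statement) =====
-- stated objective: alternative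
-- what changed: Replaces A's three set-algebra operations each followed by a sort with a sort-then-merge: both deduplicated keyword sets are sorted once and a single two-pointer merge classifies every keyword into gap/shared/unique, producing the three buckets already in sorted order.
import Mathlib
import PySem

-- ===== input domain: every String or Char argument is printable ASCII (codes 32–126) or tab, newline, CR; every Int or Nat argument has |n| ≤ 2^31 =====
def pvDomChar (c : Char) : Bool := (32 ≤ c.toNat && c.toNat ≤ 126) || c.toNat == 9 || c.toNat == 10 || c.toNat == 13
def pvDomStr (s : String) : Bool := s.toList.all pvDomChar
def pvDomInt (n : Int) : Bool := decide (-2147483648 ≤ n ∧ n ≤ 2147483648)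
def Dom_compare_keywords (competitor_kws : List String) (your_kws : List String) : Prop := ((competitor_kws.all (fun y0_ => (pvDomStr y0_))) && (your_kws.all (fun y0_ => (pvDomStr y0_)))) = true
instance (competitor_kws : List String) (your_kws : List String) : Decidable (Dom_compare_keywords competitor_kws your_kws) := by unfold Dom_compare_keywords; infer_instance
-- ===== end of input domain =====

-- B is a sort-then-merge: it sorts the two deduplicated keyword sets once and classifies
-- every keyword by a single two-pointer merge, instead of A's three set-algebra
-- operations each followed by a sort (objective: alternative, same asymptotic cost).

-- ===== PORT A =====
def compare_keywords (competitor_kws : List String) (your_kws : List String) : List (String × List String) :=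
  let comp := PySem.Set.ofList (competitor_kws.map PySem.Str.lower)
  let yours := PySem.Set.ofList (your_kws.map PySem.Str.lower)
  [("gap", PySem.List.sorted (PySem.Set.diff comp yours) (fun x => x) false),
   ("shared", PySem.List.sorted (PySem.Set.inter comp yours) (fun x => x) false),
   ("unique", PySem.List.sorted (PySem.Set.diff yours comp) (fun x => x) false)]

-- ===== PORT B =====
-- Source B's while loop over indices i, j with three append-growing buckets, ported as
-- recursion on the remaining suffixes cs[i:], ys[j:]; the final `gap += cs[i:]` /
-- `unique += ys[j:]` is the fall-through case.
def pvMergeClassify : List String → List String → List String → List String → List String → (List String × List String × List String)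
  | x :: xs, y :: ys, g, s, u =>
      if x = y then pvMergeClassify xs ys g (s ++ [x]) u
      else if x < y then pvMergeClassify xs (y :: ys) (g ++ [x]) s u
      else pvMergeClassify (x :: xs) ys g s (u ++ [y])
  | xs, ys, g, s, u => (g ++ xs, s, u ++ ys)
  termination_by xs ys _ _ _ => xs.length + ys.length

def compare_keywords_alt (competitor_kws : List String) (your_kws : List String) : List (String × List String) :=
  let cs := PySem.List.sorted (PySem.Set.ofList (competitor_kws.map PySem.Str.lower)) (fun x => x) false
  let ys := PySem.List.sorted (PySem.Set.ofList (your_kws.map PySem.Str.lower)) (fun x => x) false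
  let t := pvMergeClassify cs ys [] [] []
  [("gap", t.1), ("shared", t.2.1), ("unique", t.2.2)]

-- ===== PRECONDITION & SPEC =====
def Spec_compare_keywords (competitor_kws : List String) (your_kws : List String) (out : List (String × List String)) : Prop := out = compare_keywords_alt competitor_kws your_kws
instance (competitor_kws : List String) (your_kws : List String) (out : List (String × List String)) : Decidable (Spec_compare_keywords competitor_kws your_kws out) := by unfold Spec_compare_keywords; infer_instance

-- ===== CLAIM =====
def Claim_equal_compare_keywords : Prop := ∀ (competitor_kws : List String) (your_kws : List String), Dom_compare_keywords competitor_kws your_kws → Spec_compare_keywords competitor_kws your_kws (compare_keywords competitor_kws your_kws)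

-- ===== LEMMAS AND PROOFS =====

-- On strictly increasing inputs, the merge classifies by membership.
theorem pvMergeClassify_eq (n : Nat) : ∀ (xs ys : List String), xs.length + ys.length = n →
    xs.Pairwise (· < ·) → ys.Pairwise (· < ·) →
    ∀ g s u, pvMergeClassify xs ys g s u =
      (g ++ xs.filter (fun k => !(ys.contains k)),
       s ++ xs.filter (fun k => ys.contains k),
       u ++ ys.filter (fun k => !(xs.contains k))) := by
  induction n using Nat.strong_induction_on with
  | _ n ih =>
    intro xs ys hn hx hy g s u
    match xs, ys with
    | [], ys =>
      simp [pvMergeClassify]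
    | x :: xs', [] =>
      simp [pvMergeClassify]
    | x :: xs', y :: ys' =>
      obtain ⟨hxk, hx'⟩ := List.pairwise_cons.mp hx
      obtain ⟨hyk, hy'⟩ := List.pairwise_cons.mp hy
      rw [pvMergeClassify]
      by_cases hxy : x = y
      · subst hxy
        rw [if_pos rfl]
        rw [ih (xs'.length + ys'.length) (by simp at hn; omega) xs' ys' rfl hx' hy' g (s ++ [x]) u]
        simp only [List.filter_cons, List.contains_cons, BEq.rfl, Bool.true_or, Bool.not_true,
          reduceIte]
        simp
        refine ⟨?_, ?_, ?_⟩ <;>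
          · apply List.filter_congr
            intro k hk
            have hkx : (k == x) = false := by
              simp
              intro h; subst h
              first
                | exact lt_irrefl _ (hxk _ hk)
                | exact lt_irrefl _ (hyk _ hk)
            simp [hkx]
      · by_cases hlt : x < y
        · simp only [if_neg hxy, if_pos hlt]
          rw [ih (xs'.length + (y :: ys').length) (by simp at hn ⊢; omega) xs' (y :: ys') rfl hx' hy (g ++ [x]) s u]
          have hxny : x ∉ y :: ys' := by
            intro hmem
            rcases List.mem_cons.mp hmem with h | h
            · exact hxy h
            · exact absurd (hyk x h) (by intro h2; exact lt_asymm hlt h2)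
          have hxc : ((y :: ys').contains x) = false := by simp_all
          have h3 : (y :: ys').filter (fun k => !((x :: xs').contains k)) = (y :: ys').filter (fun k => !(xs'.contains k)) := by
            apply List.filter_congr; intro k hk
            have hklt : x < k := by
              rcases List.mem_cons.mp hk with h | h
              · subst h; exact hlt
              · exact lt_trans hlt (hyk k h)
            simp only [List.contains_cons]
            have : (k == x) = false := by simp; intro h; subst h; exact lt_irrefl _ hklt
            rw [this]; simp
          simp only [List.filter_cons, hxc, Bool.not_false, reduceIte, h3]
          simp
        · have hgt : y < x := by
            rcases lt_trichotomy x y with h | h | h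
            · exact absurd h hlt
            · exact absurd h hxy
            · exact h
          simp only [if_neg hxy, if_neg hlt]
          rw [ih ((x :: xs').length + ys'.length) (by simp at hn ⊢; omega) (x :: xs') ys' rfl hx hy' g s (u ++ [y])]
          have hynx : y ∉ x :: xs' := by
            intro hmem
            rcases List.mem_cons.mp hmem with h | h
            · exact hxy h.symm
            · exact absurd (hxk y h) (by intro h2; exact lt_asymm hgt h2)
          have hyc : ((x :: xs').contains y) = false := by simp_all
          have h1 : (x :: xs').filter (fun k => !((y :: ys').contains k)) = (x :: xs').filter (fun k => !(ys'.contains k)) := by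
            apply List.filter_congr; intro k hk
            have hklt : y < k := by
              rcases List.mem_cons.mp hk with h | h
              · subst h; exact hgt
              · exact lt_trans hgt (hxk k h)
            simp only [List.contains_cons]
            have : (k == y) = false := by simp; intro h; subst h; exact lt_irrefl _ hklt
            rw [this]; simp
          have h2 : (x :: xs').filter (fun k => (y :: ys').contains k) = (x :: xs').filter (fun k => ys'.contains k) := by
            apply List.filter_congr; intro k hk
            have hklt : y < k := by
              rcases List.mem_cons.mp hk with h | h
              · subst h; exact hgt
              · exact lt_trans hgt (hxk k h)
            simp only [List.contains_cons]
            have : (k == y) = false := by simp; intro h; subst h; exact lt_irrefl _ hklt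
            rw [this]; simp
          simp only [h1, h2, List.filter_cons, hyc, Bool.not_false, reduceIte]
          simp

theorem compare_keywords_eq (competitor_kws your_kws : List String) :
    compare_keywords competitor_kws your_kws = compare_keywords_alt competitor_kws your_kws := by
  simp only [compare_keywords, compare_keywords_alt]
  have hcomp_nodup : (PySem.Set.ofList (competitor_kws.map PySem.Str.lower)).Nodup :=
    PySem.Set.nodup_ofList _
  have hyours_nodup : (PySem.Set.ofList (your_kws.map PySem.Str.lower)).Nodup :=
    PySem.Set.nodup_ofList _
  have hcs : (PySem.List.sorted (PySem.Set.ofList (competitor_kws.map PySem.Str.lower)) (fun x => x) false).Pairwise (· < ·) :=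
    PySem.List.sorted_ofList_pairwise_lt _
  have hys : (PySem.List.sorted (PySem.Set.ofList (your_kws.map PySem.Str.lower)) (fun x => x) false).Pairwise (· < ·) :=
    PySem.List.sorted_ofList_pairwise_lt _
  have hcs_perm := PySem.List.sorted_perm (PySem.Set.ofList (competitor_kws.map PySem.Str.lower)) (fun x : String => x) false
  have hys_perm := PySem.List.sorted_perm (PySem.Set.ofList (your_kws.map PySem.Str.lower)) (fun x : String => x) false
  have hcs_nodup := hcs_perm.nodup_iff.mpr hcomp_nodup
  have hys_nodup := hys_perm.nodup_iff.mpr hyours_nodup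
  rw [pvMergeClassify_eq _ _ _ rfl hcs hys [] [] []]
  simp only [List.nil_append]
  have hgap : PySem.List.sorted (PySem.Set.diff (PySem.Set.ofList (competitor_kws.map PySem.Str.lower)) (PySem.Set.ofList (your_kws.map PySem.Str.lower))) (fun x => x) false
      = (PySem.List.sorted (PySem.Set.ofList (competitor_kws.map PySem.Str.lower)) (fun x => x) false).filter
          (fun k => !((PySem.List.sorted (PySem.Set.ofList (your_kws.map PySem.Str.lower)) (fun x => x) false).contains k)) := by
    apply PySem.List.sorted_eq_of_perm_of_pairwise_lt
    · rw [List.perm_ext_iff_of_nodup (hcs_nodup.filter _) (PySem.Set.nodup_diff _ _ hcomp_nodup)]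
      intro a
      simp [List.mem_filter, PySem.Set.mem_diff, PySem.List.mem_sorted, List.Perm.mem_iff hcs_perm]
    · exact hcs.filter _
  have hshared : PySem.List.sorted (PySem.Set.inter (PySem.Set.ofList (competitor_kws.map PySem.Str.lower)) (PySem.Set.ofList (your_kws.map PySem.Str.lower))) (fun x => x) false
      = (PySem.List.sorted (PySem.Set.ofList (competitor_kws.map PySem.Str.lower)) (fun x => x) false).filter
          (fun k => (PySem.List.sorted (PySem.Set.ofList (your_kws.map PySem.Str.lower)) (fun x => x) false).contains k) := by
    apply PySem.List.sorted_eq_of_perm_of_pairwise_lt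
    · rw [List.perm_ext_iff_of_nodup (hcs_nodup.filter _) (PySem.Set.nodup_inter _ _ hcomp_nodup)]
      intro a
      simp [List.mem_filter, PySem.Set.mem_inter, PySem.List.mem_sorted, List.Perm.mem_iff hcs_perm]
    · exact hcs.filter _
  have huniq : PySem.List.sorted (PySem.Set.diff (PySem.Set.ofList (your_kws.map PySem.Str.lower)) (PySem.Set.ofList (competitor_kws.map PySem.Str.lower))) (fun x => x) false
      = (PySem.List.sorted (PySem.Set.ofList (your_kws.map PySem.Str.lower)) (fun x => x) false).filter
          (fun k => !((PySem.List.sorted (PySem.Set.ofList (competitor_kws.map PySem.Str.lower)) (fun x => x) false).contains k)) := by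
    apply PySem.List.sorted_eq_of_perm_of_pairwise_lt
    · rw [List.perm_ext_iff_of_nodup (hys_nodup.filter _) (PySem.Set.nodup_diff _ _ hyours_nodup)]
      intro a
      simp [List.mem_filter, PySem.Set.mem_diff, PySem.List.mem_sorted, List.Perm.mem_iff hys_perm]
    · exact hys.filter _
  rw [hgap, hshared, huniq]

-- ===== VERDICT =====
theorem compare_keywords_spec : Claim_equal_compare_keywords := by
  intro c y _
  show _ = _
  exact compare_keywords_eq c y
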